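-- pv_equiv track=rewrite | github.com/PIC216/Advent_of_Code | 2023/my_functions.py | find_all_diagonals
-- ===== SOURCE A (Python) =====
-- def get_up_down_index(original_index: list = None, up: bool = True):
--     if up:
--         new_index = [original_index[0]-1, original_index[1]]
--     else:
--         new_index = [original_index[0]+1, original_index[1]]
--     return new_index
--
-- def get_right_left_index(original_index: list = None, left: bool = True):
--     if left:
--         new_index = [original_index[0], original_index[1]-1]
--     else:
--         new_index = [original_index[0], original_index[1]+1]
--     return new_index
--
-- def order_indexes(index_list: list = None, max_row_=9, max_col_=9):
--     ordered_list = []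
--     for r in range(max_row_+1):
--         for c in range(max_col_+1):
--             if [r, c] in index_list:
--                 ordered_list.append([r, c])
--     return ordered_list
--
-- def get_diagonals(original_index: list = None, max_row_=9, max_col_=9):
--     diagonals = []
--     # get ups and downs
--     if original_index[0] == 0:
--         diagonals.append(get_up_down_index(original_index, up=False))
--     elif original_index[0] == max_row_:
--         diagonals.append(get_up_down_index(original_index, up=True))
--     else:
--         diagonals.append(get_up_down_index(original_index, up=False))
--         diagonals.append(get_up_down_index(original_index, up=True))
--     # get lefts and rights
--     if original_index[1] == 0:
--         diagonals.append(get_right_left_index(original_index, left=False))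
--     elif original_index[1] == max_col_:
--         diagonals.append(get_right_left_index(original_index, left=True))
--     else:
--         diagonals.append(get_right_left_index(original_index, left=False))
--         diagonals.append(get_right_left_index(original_index, left=True))
--     # get diagonals
--     if original_index[0] == 0:
--         if original_index[1] == 0:
--             diagonals.append(get_up_down_index(get_right_left_index(original_index, left=False), up=False))
--         elif original_index[1] == max_col_:
--             diagonals.append(get_up_down_index(get_right_left_index(original_index, left=True), up=False))
--         else:
--             diagonals.append(get_up_down_index(get_right_left_index(original_index, left=False), up=False))
--             diagonals.append(get_up_down_index(get_right_left_index(original_index, left=True), up=False))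
--     elif original_index[0] == max_row_:
--         if original_index[1] == 0:
--             diagonals.append(get_up_down_index(get_right_left_index(original_index, left=False), up=True))
--         elif original_index[1] == max_col_:
--             diagonals.append(get_up_down_index(get_right_left_index(original_index, left=True), up=True))
--         else:
--             diagonals.append(get_up_down_index(get_right_left_index(original_index, left=False), up=True))
--             diagonals.append(get_up_down_index(get_right_left_index(original_index, left=True), up=True))
--     else:
--         if original_index[1] == 0:
--             diagonals.append(get_up_down_index(get_right_left_index(original_index, left=False), up=True))
--             diagonals.append(get_up_down_index(get_right_left_index(original_index, left=False), up=False))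
--         elif original_index[1] == max_col_:
--             diagonals.append(get_up_down_index(get_right_left_index(original_index, left=True), up=True))
--             diagonals.append(get_up_down_index(get_right_left_index(original_index, left=True), up=False))
--         else:
--             diagonals.append(get_up_down_index(get_right_left_index(original_index, left=False), up=True))
--             diagonals.append(get_up_down_index(get_right_left_index(original_index, left=False), up=False))
--             diagonals.append(get_up_down_index(get_right_left_index(original_index, left=True), up=True))
--             diagonals.append(get_up_down_index(get_right_left_index(original_index, left=True), up=False))
--     return order_indexes(diagonals, max_row_, max_col_)
--
-- def find_all_diagonals(list_of_indices: list = None, max_row=9, max_col=9):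
--     symbol_diagonals = []
--     for index in list_of_indices:
--         diagonals = get_diagonals(index, max_row, max_col)
--         for diagonal_index in diagonals:
--             if diagonal_index not in symbol_diagonals:
--                 symbol_diagonals.append(diagonal_index)
--     return order_indexes(symbol_diagonals, max_row, max_col)
-- ===== SOURCE B (Python) =====
-- def find_all_diagonals(list_of_indices: list = None, max_row=9, max_col=9):
--     points = {(idx[0], idx[1]) for idx in list_of_indices}
--     offsets = [(-1, -1), (-1, 0), (-1, 1), (0, -1), (0, 1), (1, -1), (1, 0), (1, 1)]
--     result = []
--     for r in range(max_row + 1):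
--         for c in range(max_col + 1):
--             if any((r + dr, c + dc) in points for dr, dc in offsets):
--                 result.append([r, c])
--     return result
-- ===== Notes on version B (the rewrite author's own statement) =====
-- stated objective: faster
-- what changed: B replaces A's per-index neighbor construction (a big boundary case analysis plus a full-grid ordering scan per input index and list-membership dedup) by one row-major scan of the grid that emits each cell as soon as one of its 8 neighbor offsets hits a hash set of the input coordinates.
import Mathlib
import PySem

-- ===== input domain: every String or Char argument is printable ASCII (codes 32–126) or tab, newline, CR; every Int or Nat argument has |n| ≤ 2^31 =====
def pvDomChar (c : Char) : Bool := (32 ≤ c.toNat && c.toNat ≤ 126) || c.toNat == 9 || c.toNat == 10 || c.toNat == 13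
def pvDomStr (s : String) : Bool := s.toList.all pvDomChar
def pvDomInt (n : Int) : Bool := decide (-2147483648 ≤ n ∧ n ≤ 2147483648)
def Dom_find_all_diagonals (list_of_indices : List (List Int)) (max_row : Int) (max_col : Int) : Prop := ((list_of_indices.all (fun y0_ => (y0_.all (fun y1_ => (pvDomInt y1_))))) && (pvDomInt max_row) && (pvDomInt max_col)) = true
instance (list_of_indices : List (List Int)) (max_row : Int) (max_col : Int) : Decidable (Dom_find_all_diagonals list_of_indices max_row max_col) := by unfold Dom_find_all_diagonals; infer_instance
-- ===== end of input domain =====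

-- B replaces A's per-index boundary case analysis + full-grid ordering scan per index by a single
-- row-major grid scan testing 8 neighbor offsets against a set of the input coordinates (faster).

-- ===== PORT A =====
-- idx[0] / idx[1] are ported as (pyGet? … ).getD 0: exact under Pre_ (every inner list has length ≥ 2).
def get_up_down_index (original_index : List Int) (up : Bool) : List Int :=
  if up then [(PySem.List.pyGet? original_index 0).getD 0 - 1, (PySem.List.pyGet? original_index 1).getD 0]
  else [(PySem.List.pyGet? original_index 0).getD 0 + 1, (PySem.List.pyGet? original_index 1).getD 0]

def get_right_left_index (original_index : List Int) (left : Bool) : List Int :=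
  if left then [(PySem.List.pyGet? original_index 0).getD 0, (PySem.List.pyGet? original_index 1).getD 0 - 1]
  else [(PySem.List.pyGet? original_index 0).getD 0, (PySem.List.pyGet? original_index 1).getD 0 + 1]

def order_indexes (index_list : List (List Int)) (max_row_ max_col_ : Int) : List (List Int) :=
  (PySem.List.pyRange 0 (max_row_ + 1) 1).foldl (fun acc r =>
    (PySem.List.pyRange 0 (max_col_ + 1) 1).foldl (fun acc2 c =>
      if [r, c] ∈ index_list then acc2 ++ [[r, c]] else acc2) acc) []

-- the 'diagonals' list get_diagonals builds before ordering it (named so the ordering step stays visible)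
def get_diagonals_list (original_index : List Int) (max_row_ max_col_ : Int) : List (List Int) :=
  let i0 := (PySem.List.pyGet? original_index 0).getD 0
  let i1 := (PySem.List.pyGet? original_index 1).getD 0
  let diagonals : List (List Int) := []
  -- get ups and downs
  let diagonals :=
    if i0 = 0 then diagonals ++ [get_up_down_index original_index false]
    else if i0 = max_row_ then diagonals ++ [get_up_down_index original_index true]
    else diagonals ++ [get_up_down_index original_index false, get_up_down_index original_index true]
  -- get lefts and rights
  let diagonals :=
    if i1 = 0 then diagonals ++ [get_right_left_index original_index false]
    else if i1 = max_col_ then diagonals ++ [get_right_left_index original_index true]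
    else diagonals ++ [get_right_left_index original_index false, get_right_left_index original_index true]
  -- get diagonals
  let diagonals :=
    if i0 = 0 then
      if i1 = 0 then diagonals ++ [get_up_down_index (get_right_left_index original_index false) false]
      else if i1 = max_col_ then diagonals ++ [get_up_down_index (get_right_left_index original_index true) false]
      else diagonals ++ [get_up_down_index (get_right_left_index original_index false) false,
                         get_up_down_index (get_right_left_index original_index true) false]
    else if i0 = max_row_ then
      if i1 = 0 then diagonals ++ [get_up_down_index (get_right_left_index original_index false) true]
      else if i1 = max_col_ then diagonals ++ [get_up_down_index (get_right_left_index original_index true) true]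
      else diagonals ++ [get_up_down_index (get_right_left_index original_index false) true,
                         get_up_down_index (get_right_left_index original_index true) true]
    else
      if i1 = 0 then diagonals ++ [get_up_down_index (get_right_left_index original_index false) true,
                                   get_up_down_index (get_right_left_index original_index false) false]
      else if i1 = max_col_ then diagonals ++ [get_up_down_index (get_right_left_index original_index true) true,
                                               get_up_down_index (get_right_left_index original_index true) false]
      else diagonals ++ [get_up_down_index (get_right_left_index original_index false) true,
                         get_up_down_index (get_right_left_index original_index false) false,
                         get_up_down_index (get_right_left_index original_index true) true,
                         get_up_down_index (get_right_left_index original_index true) false]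
  diagonals

def get_diagonals (original_index : List Int) (max_row_ max_col_ : Int) : List (List Int) :=
  order_indexes (get_diagonals_list original_index max_row_ max_col_) max_row_ max_col_

def find_all_diagonals (list_of_indices : List (List Int)) (max_row : Int) (max_col : Int) : List (List Int) :=
  let symbol_diagonals :=
    list_of_indices.foldl (fun acc index =>
      (get_diagonals index max_row max_col).foldl
        (fun acc2 d => if d ∈ acc2 then acc2 else acc2 ++ [d]) acc) []
  order_indexes symbol_diagonals max_row max_col

-- ===== PORT B =====
def pvOffsets : List (Int × Int) := [(-1, -1), (-1, 0), (-1, 1), (0, -1), (0, 1), (1, -1), (1, 0), (1, 1)]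

def find_all_diagonals_alt (list_of_indices : List (List Int)) (max_row : Int) (max_col : Int) : List (List Int) :=
  let points : PySem.Set (Int × Int) :=
    PySem.Set.ofList (list_of_indices.map (fun idx =>
      ((PySem.List.pyGet? idx 0).getD 0, (PySem.List.pyGet? idx 1).getD 0)))
  (PySem.List.pyRange 0 (max_row + 1) 1).foldl (fun acc r =>
    (PySem.List.pyRange 0 (max_col + 1) 1).foldl (fun acc2 c =>
      if pvOffsets.any (fun d => PySem.Set.contains points (r + d.1, c + d.2)) then acc2 ++ [[r, c]] else acc2) acc) []

-- ===== PRECONDITION & SPEC =====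
-- Pre_ excludes exactly the inputs on which the Python A raises IndexError: an inner list with
-- fewer than 2 elements (A reads index[0] and index[1]).
def Pre_find_all_diagonals (list_of_indices : List (List Int)) (max_row : Int) (max_col : Int) : Prop :=
  (list_of_indices.all (fun l => decide (2 ≤ l.length))) = true
instance (list_of_indices : List (List Int)) (max_row : Int) (max_col : Int) : Decidable (Pre_find_all_diagonals list_of_indices max_row max_col) := by unfold Pre_find_all_diagonals; infer_instance

def pvWitness_find_all_diagonals : List (List Int) × Int × Int := ([[0, 0], [2, 3]], 4, 4)

def Spec_find_all_diagonals (list_of_indices : List (List Int)) (max_row : Int) (max_col : Int) (out : List (List Int)) : Prop := out = find_all_diagonals_alt list_of_indices max_row max_col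
instance (list_of_indices : List (List Int)) (max_row : Int) (max_col : Int) (out : List (List Int)) : Decidable (Spec_find_all_diagonals list_of_indices max_row max_col out) := by unfold Spec_find_all_diagonals; infer_instance

-- ===== CLAIM (what is proved, stated in full; the proofs are below) =====
def Claim_equal_find_all_diagonals : Prop := ∀ (list_of_indices : List (List Int)) (max_row : Int) (max_col : Int), Dom_find_all_diagonals list_of_indices max_row max_col → Pre_find_all_diagonals list_of_indices max_row max_col → Spec_find_all_diagonals list_of_indices max_row max_col (find_all_diagonals list_of_indices max_row max_col)

-- ===== LEMMAS AND PROOFS =====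

-- the Chebyshev-distance-1 neighbor relation, written linearly
def pvNbr (i0 i1 r c : Int) : Prop :=
  i0 - 1 ≤ r ∧ r ≤ i0 + 1 ∧ i1 - 1 ≤ c ∧ c ≤ i1 + 1 ∧ ¬(r = i0 ∧ c = i1)

theorem pvGet0 (x y : Int) : (PySem.List.pyGet? [x, y] 0).getD 0 = x := by
  simp [pysem]

theorem pvGet1 (x y : Int) : (PySem.List.pyGet? [x, y] 1).getD 0 = y := by
  simp [pysem]

theorem mem_dedup_fold (x : List Int) (L : List (List Int)) (acc : List (List Int)) :
    x ∈ L.foldl (fun a d => if d ∈ a then a else a ++ [d]) acc ↔ x ∈ acc ∨ x ∈ L := by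
  induction L generalizing acc with
  | nil => simp
  | cons d L ih =>
    simp only [List.foldl_cons, ih, List.mem_cons]
    by_cases h : d ∈ acc
    · simp only [if_pos h]
      constructor
      · rintro (hx | hx) <;> tauto
      · rintro (hx | rfl | hx)
        · exact Or.inl hx
        · exact Or.inl h
        · exact Or.inr hx
    · simp only [if_neg h, List.mem_append, List.mem_singleton]
      tauto

theorem mem_symbol (x : List Int) (lst : List (List Int)) (mr mc : Int) (acc : List (List Int)) :
    x ∈ lst.foldl (fun acc index =>
        (get_diagonals index mr mc).foldl (fun acc2 d => if d ∈ acc2 then acc2 else acc2 ++ [d]) acc) acc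
      ↔ x ∈ acc ∨ ∃ i ∈ lst, x ∈ get_diagonals i mr mc := by
  induction lst generalizing acc with
  | nil => simp
  | cons i lst ih =>
    simp only [List.foldl_cons, ih, mem_dedup_fold, List.mem_cons]
    constructor
    · rintro ((hx | hx) | ⟨j, hj, hx⟩)
      · exact Or.inl hx
      · exact Or.inr ⟨i, Or.inl rfl, hx⟩
      · exact Or.inr ⟨j, Or.inr hj, hx⟩
    · rintro (hx | ⟨j, (rfl | hj), hx⟩)
      · exact Or.inl (Or.inl hx)
      · exact Or.inl (Or.inr hx)
      · exact Or.inr ⟨j, hj, hx⟩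

theorem inner_fold_eq (L : List (List Int)) (mc r : Int) (acc : List (List Int)) :
    (PySem.List.pyRange 0 (mc + 1) 1).foldl (fun acc2 c => if [r, c] ∈ L then acc2 ++ [[r, c]] else acc2) acc
      = acc ++ ((PySem.List.pyRange 0 (mc + 1) 1).filter (fun c => decide ([r, c] ∈ L))).map (fun c => ([r, c] : List Int)) := by
  rw [← PySem.List.foldl_append_if]
  simp only [decide_eq_true_eq]

theorem order_indexes_eq (L : List (List Int)) (mr mc : Int) :
    order_indexes L mr mc
      = (PySem.List.pyRange 0 (mr + 1) 1).flatMap (fun r =>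
          ((PySem.List.pyRange 0 (mc + 1) 1).filter (fun c => decide ([r, c] ∈ L))).map (fun c => ([r, c] : List Int))) := by
  unfold order_indexes
  simp only [inner_fold_eq]
  rw [PySem.List.foldl_append_eq_flatMap]
  simp

theorem mem_order_indexes (L : List (List Int)) (mr mc : Int) (x : List Int) :
    x ∈ order_indexes L mr mc ↔
      ∃ r c, (0 ≤ r ∧ r < mr + 1) ∧ (0 ≤ c ∧ c < mc + 1) ∧ x = [r, c] ∧ [r, c] ∈ L := by
  simp only [order_indexes_eq, List.mem_flatMap, List.mem_map, List.mem_filter,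
    PySem.List.mem_pyRange_one, decide_eq_true_eq]
  aesop

theorem mem_get_diagonals_list (oi : List Int) (mr mc a b : Int)
    (ha : 0 ≤ a) (ha' : a < mr + 1) (hb : 0 ≤ b) (hb' : b < mc + 1) :
    [a, b] ∈ get_diagonals_list oi mr mc ↔
      pvNbr ((PySem.List.pyGet? oi 0).getD 0) ((PySem.List.pyGet? oi 1).getD 0) a b := by
  simp only [get_diagonals_list, get_up_down_index, get_right_left_index, pvNbr,
    Bool.false_eq_true, if_false, if_true, pvGet0, pvGet1]
  split_ifs <;>
    simp only [List.nil_append, List.mem_append, List.mem_cons, List.not_mem_nil, or_false,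
      List.cons.injEq, and_true] <;>
    omega

theorem pvNbr_iff_offsets (i0 i1 r c : Int) :
    (∃ d ∈ pvOffsets, r + d.1 = i0 ∧ c + d.2 = i1) ↔ pvNbr i0 i1 r c := by
  simp [pvOffsets, pvNbr]
  omega

theorem cond_iff (lst : List (List Int)) (mr mc r c : Int)
    (hr : 0 ≤ r) (hr' : r < mr + 1) (hc : 0 ≤ c) (hc' : c < mc + 1) :
    ([r, c] ∈ lst.foldl (fun acc index =>
        (get_diagonals index mr mc).foldl (fun acc2 d => if d ∈ acc2 then acc2 else acc2 ++ [d]) acc) [])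
      ↔ (pvOffsets.any (fun d => PySem.Set.contains
            (PySem.Set.ofList (lst.map (fun idx =>
              ((PySem.List.pyGet? idx 0).getD 0, (PySem.List.pyGet? idx 1).getD 0))))
            (r + d.1, c + d.2)) = true) := by
  rw [mem_symbol]
  simp only [List.not_mem_nil, false_or]
  have hA : ∀ i : List Int, [r, c] ∈ get_diagonals i mr mc ↔
      pvNbr ((PySem.List.pyGet? i 0).getD 0) ((PySem.List.pyGet? i 1).getD 0) r c := by
    intro i
    rw [get_diagonals, mem_order_indexes]
    constructor
    · rintro ⟨r', c', _, _, heq, hm⟩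
      obtain ⟨rfl, rfl⟩ : r = r' ∧ c = c' := by
        simpa [List.cons.injEq] using heq
      exact (mem_get_diagonals_list i mr mc r c hr hr' hc hc').1 hm
    · intro h
      exact ⟨r, c, ⟨hr, hr'⟩, ⟨hc, hc'⟩, rfl, (mem_get_diagonals_list i mr mc r c hr hr' hc hc').2 h⟩
  have hC : ∀ p : Int × Int,
      (PySem.Set.contains (PySem.Set.ofList (lst.map (fun idx =>
        ((PySem.List.pyGet? idx 0).getD 0, (PySem.List.pyGet? idx 1).getD 0)))) p = true)
      ↔ ∃ i ∈ lst, ((PySem.List.pyGet? i 0).getD 0, (PySem.List.pyGet? i 1).getD 0) = p := by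
    intro p
    simp [PySem.Set.contains, PySem.Set.mem_ofList, List.mem_map]
  simp only [hA, List.any_eq_true, hC]
  constructor
  · rintro ⟨i, hi, hn⟩
    obtain ⟨d, hd, h1, h2⟩ := (pvNbr_iff_offsets _ _ r c).2 hn
    exact ⟨d, hd, i, hi, by rw [Prod.mk.injEq]; exact ⟨h1.symm, h2.symm⟩⟩
  · rintro ⟨d, hd, i, hi, heq⟩
    rw [Prod.mk.injEq] at heq
    exact ⟨i, hi, (pvNbr_iff_offsets _ _ r c).1 ⟨d, hd, heq.1.symm, heq.2.symm⟩⟩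

-- ===== VERDICT (by name: the statement is the Claim_ definition above) =====
theorem find_all_diagonals_spec : Claim_equal_find_all_diagonals := by
  intro lst mr mc _ _
  unfold Spec_find_all_diagonals find_all_diagonals find_all_diagonals_alt
  rw [order_indexes_eq]
  simp only [PySem.List.foldl_append_if]
  rw [PySem.List.foldl_append_eq_flatMap]
  simp only [List.nil_append]
  apply List.flatMap_congr
  intro r hr
  rw [PySem.List.mem_pyRange_one] at hr
  congr 1
  apply List.filter_congr
  intro c hc
  rw [PySem.List.mem_pyRange_one] at hc
  calc decide ([r, c] ∈ lst.foldl (fun acc index =>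
        (get_diagonals index mr mc).foldl (fun acc2 d => if d ∈ acc2 then acc2 else acc2 ++ [d]) acc) [])
      = decide ((pvOffsets.any (fun d => PySem.Set.contains
            (PySem.Set.ofList (lst.map (fun idx =>
              ((PySem.List.pyGet? idx 0).getD 0, (PySem.List.pyGet? idx 1).getD 0))))
            (r + d.1, c + d.2))) = true) :=
        decide_eq_decide.mpr (cond_iff lst mr mc r c hr.1 hr.2 hc.1 hc.2)
    _ = _ := by simp
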